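-- pv_equiv track=rewrite | github.com/Waste-Wood/Continual-Joint-Reasoning | module/bart_loop.py | retrieve_paths
-- ===== SOURCE A (Python) =====
-- def retrieve_paths(srcs, dsts, triples):
--     relation_dict = {}
--     for x, y, z in triples:
--         if x not in relation_dict:
--             relation_dict[x] = [[y, z]]
--         else:
--             relation_dict[x].append([y, z])
--
--     chains = [[s] for s in srcs]
--     for _ in range(2):
--         tmp_chains = []
--         for s in chains:
--             if s[-1] in relation_dict:
--                 tails = [t for t in relation_dict[s[-1]]][0:1]
--                 tmp_chains += [s + t for t in tails]
--         chains = tmp_chains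
--     chains = [' '.join(chain) for chain in chains[:10]]
--     return chains
-- ===== SOURCE B (Python) =====
-- def retrieve_paths(srcs, dsts, triples):
--     first = {}
--     for x, y, z in triples:
--         if x not in first:
--             first[x] = (y, z)
--     out = []
--     for s in srcs:
--         p = first.get(s)
--         if p is None:
--             continue
--         q = first.get(p[1])
--         if q is None:
--             continue
--         out.append(' '.join((s, p[0], p[1], q[0], q[1])))
--     return out[:10]
-- ===== Notes on version B (the rewrite author's own statement) =====
-- stated objective: alternative
-- what changed: B keeps only the first [y,z] tail per head in the index (instead of appending every tail and slicing to one later) and replaces the 2-round level-by-level expansion of all chains with a direct 2-step walk per source, appending each surviving joined 5-token chain in one pass.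
import Mathlib
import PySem

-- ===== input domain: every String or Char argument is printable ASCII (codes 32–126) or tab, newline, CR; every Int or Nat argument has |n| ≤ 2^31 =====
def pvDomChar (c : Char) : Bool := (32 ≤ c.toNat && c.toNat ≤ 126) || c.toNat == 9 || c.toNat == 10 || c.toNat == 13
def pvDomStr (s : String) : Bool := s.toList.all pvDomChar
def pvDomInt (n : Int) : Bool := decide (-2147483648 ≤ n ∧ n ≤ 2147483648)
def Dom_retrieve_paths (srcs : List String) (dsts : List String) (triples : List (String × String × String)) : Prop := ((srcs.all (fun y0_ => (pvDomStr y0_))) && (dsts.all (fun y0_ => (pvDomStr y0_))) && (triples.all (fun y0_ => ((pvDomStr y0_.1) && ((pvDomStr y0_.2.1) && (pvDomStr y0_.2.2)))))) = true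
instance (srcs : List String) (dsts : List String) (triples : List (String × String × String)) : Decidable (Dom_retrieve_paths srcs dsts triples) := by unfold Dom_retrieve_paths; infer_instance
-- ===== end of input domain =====

-- B replaces A's level-by-level expansion of all chains over 2 rounds by a first-tail
-- index and a direct 2-step walk per source (a different decomposition of the same task; same return value).

-- ===== PORT A =====
def retrieve_paths (srcs : List String) (dsts : List String) (triples : List (String × String × String)) : List String :=
  let relation_dict : PySem.Dict String (List (List String)) :=
    triples.foldl (fun d t =>
      if d.contains t.1 = false then d.insert t.1 [[t.2.1, t.2.2]]
      else d.modify t.1 [] (fun l => l ++ [[t.2.1, t.2.2]])) PySem.Dict.empty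
  let chains0 : List (List String) := srcs.map (fun s => [s])
  let chains2 : List (List String) :=
    (List.range 2).foldl (fun chains _ =>
      chains.foldl (fun tmp_chains s =>
        match PySem.List.pyGet? s (-1) with
        | none => tmp_chains   -- chains' elements are never empty, so Python's s[-1] never raises
        | some lastEl =>
          match relation_dict.get? lastEl with
          | none => tmp_chains
          | some ts =>
            tmp_chains ++ (PySem.List.slice ts (some 0) (some 1)).map (fun t => s ++ t)) []) chains0
  (PySem.List.slice chains2 (some 0) (some 10)).map (fun chain => PySem.Str.join " " chain)

-- ===== PORT B =====
def retrieve_paths_alt (srcs : List String) (dsts : List String) (triples : List (String × String × String)) : List String :=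
  let first : PySem.Dict String (String × String) :=
    triples.foldl (fun d t => if d.contains t.1 then d else d.insert t.1 (t.2.1, t.2.2)) PySem.Dict.empty
  let out : List String := srcs.filterMap (fun s =>
    (first.get? s).bind (fun p =>
      (first.get? p.2).map (fun q => PySem.Str.join " " [s, p.1, p.2, q.1, q.2])))
  PySem.List.slice out (some 0) (some 10)

-- ===== PRECONDITION & SPEC =====
def Spec_retrieve_paths (srcs : List String) (dsts : List String) (triples : List (String × String × String)) (out : List String) : Prop := out = retrieve_paths_alt srcs dsts triples
instance (srcs : List String) (dsts : List String) (triples : List (String × String × String)) (out : List String) : Decidable (Spec_retrieve_paths srcs dsts triples out) := by unfold Spec_retrieve_paths; infer_instance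

-- ===== CLAIM (what is proved, stated in full; the proofs are below) =====
def Claim_equal_retrieve_paths : Prop := ∀ (srcs : List String) (dsts : List String) (triples : List (String × String × String)), Dom_retrieve_paths srcs dsts triples → Spec_retrieve_paths srcs dsts triples (retrieve_paths srcs dsts triples)

-- ===== LEMMAS AND PROOFS =====

-- generic bridge: get? expressed through contains and getD
theorem pv_get?_eq_ite {ν : Type} (d : PySem.Dict String ν) (x : String) (d0 : ν) :
    d.get? x = if d.contains x = true then some (d.getD x d0) else none := by
  rw [PySem.Dict.contains_eq_isSome_get?, PySem.Dict.getD_eq_get?_getD]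
  cases d.get? x <;> simp

-- get? after modify (derived from contains_modify / getD_modify)
theorem pv_get?_modify {ν : Type} (d : PySem.Dict String ν) (k : String) (d0 : ν)
    (f : ν → ν) (x : String) :
    (d.modify k d0 f).get? x = if x = k then some (f (d.getD k d0)) else d.get? x := by
  rw [pv_get?_eq_ite (d.modify k d0 f) x d0, pv_get?_eq_ite d x d0]
  rw [PySem.Dict.contains_modify, PySem.Dict.getD_modify]
  by_cases hx : x = k <;> simp [hx]

-- the relation between A's full index and B's first-tail index
def pvInv (dA : PySem.Dict String (List (List String))) (dB : PySem.Dict String (String × String)) : Prop :=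
  ∀ x, ((dA.get? x).isSome = (dB.get? x).isSome) ∧
       ((dA.get? x).bind List.head? = (dB.get? x).map (fun p => [p.1, p.2]))

theorem pvInv_empty : pvInv PySem.Dict.empty PySem.Dict.empty := by
  intro x; simp [PySem.Dict.get?_empty]

theorem pvInv_step (dA : PySem.Dict String (List (List String)))
    (dB : PySem.Dict String (String × String)) (t : String × String × String)
    (h : pvInv dA dB) :
    pvInv (if dA.contains t.1 = false then dA.insert t.1 [[t.2.1, t.2.2]]
           else dA.modify t.1 [] (fun l => l ++ [[t.2.1, t.2.2]]))
          (if dB.contains t.1 then dB else dB.insert t.1 (t.2.1, t.2.2)) := by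
  have hc : dA.contains t.1 = dB.contains t.1 := by
    rw [PySem.Dict.contains_eq_isSome_get?, PySem.Dict.contains_eq_isSome_get?, (h t.1).1]
  cases hb : dB.contains t.1 with
  | false =>
    rw [hc, hb, if_pos rfl, if_neg (by simp : ¬ (false = true))]
    intro x
    by_cases hx : x = t.1
    · subst hx
      rw [PySem.Dict.get?_insert_self, PySem.Dict.get?_insert_self]; simp
    · rw [PySem.Dict.get?_insert_of_ne _ _ hx, PySem.Dict.get?_insert_of_ne _ _ hx]
      exact h x
  | true =>
    rw [hc, hb, if_neg (by simp : ¬ (true = false)), if_pos rfl]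
    intro x
    by_cases hx : x = t.1
    · subst hx
      have hbs : (dB.get? t.1).isSome := by
        rw [← PySem.Dict.contains_eq_isSome_get?]; exact hb
      obtain ⟨p, hp⟩ := Option.isSome_iff_exists.mp hbs
      have hA : (dA.get? t.1).isSome := by rw [(h t.1).1]; exact hbs
      obtain ⟨l, hl⟩ := Option.isSome_iff_exists.mp hA
      have hhead : l.head? = some [p.1, p.2] := by
        have := (h t.1).2; rw [hl, hp] at this; simpa using this
      obtain ⟨a, l', rfl⟩ : ∃ a l', l = a :: l' := by
        cases l with
        | nil => simp at hhead
        | cons a l' => exact ⟨a, l', rfl⟩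
      have ha : a = [p.1, p.2] := by simpa using hhead
      have hgd : dA.getD t.1 [] = a :: l' := by
        rw [PySem.Dict.getD_eq_get?_getD, hl]; rfl
      rw [pv_get?_modify, if_pos rfl, hgd, hp]
      simp [ha]
    · rw [pv_get?_modify, if_neg hx]
      exact h x

theorem pvInv_fold (triples : List (String × String × String)) :
    ∀ (dA : PySem.Dict String (List (List String))) (dB : PySem.Dict String (String × String)),
      pvInv dA dB →
      pvInv (triples.foldl (fun d t =>
               if d.contains t.1 = false then d.insert t.1 [[t.2.1, t.2.2]]
               else d.modify t.1 [] (fun l => l ++ [[t.2.1, t.2.2]])) dA)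
            (triples.foldl (fun d t => if d.contains t.1 then d else d.insert t.1 (t.2.1, t.2.2)) dB) := by
  induction triples with
  | nil => intro dA dB h; simpa using h
  | cons t rest ih =>
    intro dA dB h
    simp only [List.foldl_cons]
    exact ih _ _ (pvInv_step dA dB t h)

-- one chain-expansion step of A, per chain
def pvG (dA : PySem.Dict String (List (List String))) (s : List String) : List (List String) :=
  match PySem.List.pyGet? s (-1) with
  | none => []
  | some lastEl =>
    match dA.get? lastEl with
    | none => []
    | some ts => (PySem.List.slice ts (some 0) (some 1)).map (fun t => s ++ t)

theorem pv_round_eq (dA : PySem.Dict String (List (List String)))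
    (chains : List (List String)) (acc : List (List String)) :
    chains.foldl (fun tmp_chains s =>
        match PySem.List.pyGet? s (-1) with
        | none => tmp_chains
        | some lastEl =>
          match dA.get? lastEl with
          | none => tmp_chains
          | some ts =>
            tmp_chains ++ (PySem.List.slice ts (some 0) (some 1)).map (fun t => s ++ t)) acc
      = acc ++ chains.flatMap (pvG dA) := by
  induction chains generalizing acc with
  | nil => simp
  | cons s rest ih =>
    simp only [List.foldl_cons, List.flatMap_cons]
    rcases hg : PySem.List.pyGet? s (-1) with _ | lastEl
    · simp only [pvG, hg]; rw [ih]; simp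
    · rcases hd : dA.get? lastEl with _ | ts
      · simp only [pvG, hg, hd]; rw [ih]; simp
      · simp only [pvG, hg, hd]; rw [ih]; simp

theorem pv_slice_take1 {α : Type} (x : α) (l : List α) :
    PySem.List.slice (x :: l) none (some 1) = [x] := by
  have h := PySem.List.slice_to_natCast (xs := x :: l) (b := 1)
  simpa using h

theorem pv_slice_take10 {α : Type} (xs : List α) :
    PySem.List.slice xs (some 0) (some 10) = xs.take 10 := by
  rw [PySem.List.slice_zero_start]
  have h := PySem.List.slice_to_natCast (xs := xs) (b := 10)
  simpa using h

theorem pv_chains_eq (dA : PySem.Dict String (List (List String)))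
    (dB : PySem.Dict String (String × String)) (h : pvInv dA dB) (srcs : List String) :
    ((srcs.map (fun s => [s])).flatMap (pvG dA)).flatMap (pvG dA)
      = srcs.filterMap (fun s =>
          (dB.get? s).bind (fun p =>
            (dB.get? p.2).map (fun q => [s, p.1, p.2, q.1, q.2]))) := by
  induction srcs with
  | nil => simp
  | cons s rest ih =>
    have h1 : PySem.List.pyGet? [s] (-1) = some s := by
      rw [PySem.List.pyGet?_neg_one]; rfl
    rcases hb : dB.get? s with _ | p
    · -- s is not a key: A drops the chain in round 1, B skips s
      have hA : dA.get? s = none := by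
        have h1' := (h s).1; rw [hb] at h1'
        exact Option.not_isSome_iff_eq_none.mp (by simp [h1'])
      simp [pvG, h1, hA, hb, ih]
    · -- s has first tail p
      have hAs : (dA.get? s).isSome := by rw [(h s).1, hb]; rfl
      obtain ⟨l, hl⟩ := Option.isSome_iff_exists.mp hAs
      have hhead : l.head? = some [p.1, p.2] := by
        have h2' := (h s).2; rw [hl, hb] at h2'; simpa using h2'
      obtain ⟨a, l', rfl⟩ : ∃ a l', l = a :: l' := by
        cases l with
        | nil => simp at hhead
        | cons a l' => exact ⟨a, l', rfl⟩
      have ha : a = [p.1, p.2] := by simpa using hhead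
      subst ha
      have h2 : PySem.List.pyGet? [s, p.1, p.2] (-1) = some p.2 := by
        rw [PySem.List.pyGet?_neg_one]; rfl
      rcases hb2 : dB.get? p.2 with _ | q
      · have hA2 : dA.get? p.2 = none := by
          have h1' := (h p.2).1; rw [hb2] at h1'
          exact Option.not_isSome_iff_eq_none.mp (by simp [h1'])
        simp [pvG, h1, h2, hl, hA2, pv_slice_take1, hb, hb2, ih]
      · have hAs2 : (dA.get? p.2).isSome := by rw [(h p.2).1, hb2]; rfl
        obtain ⟨l2, hl2⟩ := Option.isSome_iff_exists.mp hAs2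
        have hhead2 : l2.head? = some [q.1, q.2] := by
          have h2' := (h p.2).2; rw [hl2, hb2] at h2'; simpa using h2'
        obtain ⟨a2, l2', rfl⟩ : ∃ a2 l2', l2 = a2 :: l2' := by
          cases l2 with
          | nil => simp at hhead2
          | cons a2 l2' => exact ⟨a2, l2', rfl⟩
        have ha2 : a2 = [q.1, q.2] := by simpa using hhead2
        subst ha2
        simp [pvG, h1, h2, hl, hl2, pv_slice_take1, hb, hb2, ih]

-- ===== VERDICT (by name: the statement is the Claim_ definition above) =====
theorem retrieve_paths_spec : Claim_equal_retrieve_paths := by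
  intro srcs dsts triples _
  unfold Spec_retrieve_paths retrieve_paths retrieve_paths_alt
  have hinv := pvInv_fold triples PySem.Dict.empty PySem.Dict.empty pvInv_empty
  set dA := triples.foldl (fun d t =>
      if d.contains t.1 = false then d.insert t.1 [[t.2.1, t.2.2]]
      else d.modify t.1 [] (fun l => l ++ [[t.2.1, t.2.2]])) PySem.Dict.empty with hdA
  set dB := triples.foldl (fun d t => if d.contains t.1 then d else d.insert t.1 (t.2.1, t.2.2)) PySem.Dict.empty with hdB
  have hrange : List.range 2 = [0, 1] := by decide
  rw [hrange]
  simp only [List.foldl_cons, List.foldl_nil]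
  rw [pv_round_eq dA, pv_round_eq dA]
  simp only [List.nil_append]
  rw [pv_chains_eq dA dB hinv srcs]
  rw [pv_slice_take10, pv_slice_take10, List.map_take, List.map_filterMap]
  congr 1
  refine congrArg (fun f => List.filterMap f srcs) ?_
  funext s
  rcases dB.get? s with _ | p
  · rfl
  · rcases hq : dB.get? p.2 with _ | q <;> simp [hq]
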